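-- pv_equiv track=rewrite | github.com/Any-Winter-4079/RAG-based-Email-Autoresponder | helpers/data.py | normalize_subject
-- ===== SOURCE A (Python) =====
-- def normalize_subject(subject):
--     # convert to lowercase and remove reply/forward prefixes
--     normalized = subject.strip().lower()
--     prefixes = ["re:", "fw:", "fwd:"]
--     prefix_removed = True
--     while prefix_removed:
--         prefix_removed = False
--         for prefix in prefixes:
--             if normalized.startswith(prefix):
--                 normalized = normalized[len(prefix):].strip()
--                 prefix_removed = True
--     return normalized
-- ===== SOURCE B (Python) =====
-- def normalize_subject(subject):
--     # single left-to-right scan with an index: skip whitespace, consume any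
--     # number of re:/fw:/fwd: prefixes, and slice the subject once at the end
--     s = subject.strip().lower()
--     i = 0
--     n = len(s)
--     while True:
--         while i < n and s[i] in " \t\n\r\v\f":
--             i += 1
--         if s.startswith("re:", i) or s.startswith("fw:", i):
--             i += 3
--         elif s.startswith("fwd:", i):
--             i += 4
--         else:
--             return s[i:]
-- ===== Notes on version B (the rewrite author's own statement) =====
-- stated objective: alternative
-- what changed: A repeatedly re-slices and re-strips the string in a fixed-point while/for loop; B makes one left-to-right scan with an index that skips whitespace and consumes re:/fw:/fwd: prefixes, slicing the string exactly once at the end.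
import Mathlib
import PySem

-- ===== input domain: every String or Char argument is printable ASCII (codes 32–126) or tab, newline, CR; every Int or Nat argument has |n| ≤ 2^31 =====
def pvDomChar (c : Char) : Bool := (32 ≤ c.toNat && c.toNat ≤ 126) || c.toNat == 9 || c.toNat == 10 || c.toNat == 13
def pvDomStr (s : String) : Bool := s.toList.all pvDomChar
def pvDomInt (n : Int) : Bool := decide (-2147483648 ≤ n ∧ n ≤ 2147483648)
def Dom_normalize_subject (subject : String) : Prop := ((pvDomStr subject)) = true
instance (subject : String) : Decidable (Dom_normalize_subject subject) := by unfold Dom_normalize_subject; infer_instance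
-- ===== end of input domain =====

-- B replaces A's fixed-point loop of slice-and-strip passes by a single index-advancing scan
-- that slices once at the end (alternative decomposition; return value only, no mutation).

-- ===== PORT A =====
-- body of `for prefix in prefixes` for one prefix; state = (normalized, prefix_removed)
def nsStep (st : List Char × Bool) (p : List Char) : List Char × Bool :=
  if PySem.Chars.startswith st.1 p then (PySem.Chars.strip (st.1.drop p.length), true) else st

-- one iteration of the while body: the for-loop over the three literal prefixes, unrolled
def nsPass (s : List Char) : List Char × Bool :=
  nsStep (nsStep (nsStep (s, false) ['r', 'e', ':']) ['f', 'w', ':']) ['f', 'w', 'd', ':']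

-- termination lemmas cited by nsLoopA's decreasing_by
theorem nsStripLenLe (l : List Char) : (PySem.Chars.strip l).length ≤ l.length := by
  have h1 := List.length_dropWhile_le PySem.Chars.isspace l
  have h2 := List.length_dropWhile_le PySem.Chars.isspace
    (List.dropWhile PySem.Chars.isspace l).reverse
  simp [PySem.Chars.strip, PySem.Chars.rstrip, PySem.Chars.lstrip] at *
  omega

theorem nsStepCases (st : List Char × Bool) (p : List Char) :
    nsStep st p = st ∨ ((nsStep st p).2 = true ∧ (nsStep st p).1.length + p.length ≤ st.1.length) := by
  unfold nsStep
  split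
  · right
    rename_i hsw
    have hp : p.length ≤ st.1.length :=
      List.IsPrefix.length_le ((PySem.Chars.startswith_iff _ _).mp hsw)
    have h1 := nsStripLenLe (st.1.drop p.length)
    have h2 : (st.1.drop p.length).length = st.1.length - p.length := List.length_drop
    exact ⟨rfl, by simp only; omega⟩
  · left; rfl

theorem nsStepInv (st : List Char × Bool) (p : List Char) (N : Nat) (hp : 0 < p.length)
    (h : st.2 = true → st.1.length < N) (h2 : st.1.length ≤ N) :
    ((nsStep st p).2 = true → (nsStep st p).1.length < N) ∧ (nsStep st p).1.length ≤ N := by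
  rcases nsStepCases st p with e | ⟨f, l⟩
  · rw [e]; exact ⟨h, h2⟩
  · exact ⟨fun _ => by omega, by omega⟩

theorem nsPassLt (s : List Char) (h : (nsPass s).2 = true) : (nsPass s).1.length < s.length := by
  have i0 : ((s, false).2 = true → (s, false).1.length < s.length) ∧ (s, false).1.length ≤ s.length := by
    exact ⟨fun hc => by simp at hc, le_refl _⟩
  have i1 := nsStepInv (s, false) ['r', 'e', ':'] s.length (by decide) i0.1 i0.2
  have i2 := nsStepInv _ ['f', 'w', ':'] s.length (by decide) i1.1 i1.2
  have i3 := nsStepInv _ ['f', 'w', 'd', ':'] s.length (by decide) i2.1 i2.2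
  exact i3.1 h

-- the while loop
def nsLoopA (s : List Char) : List Char :=
  if h : (nsPass s).2 = true then nsLoopA (nsPass s).1 else (nsPass s).1
termination_by s.length
decreasing_by exact nsPassLt s h

def normalize_subject (subject : String) : String :=
  String.ofList (nsLoopA (PySem.Chars.lower (PySem.Chars.strip subject.toList)))

-- ===== PORT B =====
-- c in " \t\n\r\v\f"
def nsWs (c : Char) : Bool := decide (c ∈ [' ', '\t', '\n', '\r', '\x0B', '\x0C'])

-- the inner `while i < n and s[i] in " \t\n\r\v\f": i += 1` loop (short-circuit `and` = nested if)
def nsSkip (s : List Char) (i : Nat) : Nat :=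
  if h : i < s.length then
    if nsWs s[i] then nsSkip s (i + 1) else i
  else i
termination_by s.length - i
decreasing_by omega

-- cited by nsLoopB's decreasing_by
theorem nsSkipGe (s : List Char) (i : Nat) : i ≤ nsSkip s i := by
  induction i using nsSkip.induct s with
  | case1 i h hw ih => rw [nsSkip, dif_pos h, if_pos hw]; omega
  | case2 i h hw => rw [nsSkip, dif_pos h, if_neg hw]
  | case3 i h => rw [nsSkip, dif_neg h]

theorem nsSwLen (s p : List Char) (h : PySem.Chars.startswith s p = true) : p.length ≤ s.length :=
  List.IsPrefix.length_le ((PySem.Chars.startswith_iff s p).mp h)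

-- the outer while True loop; s.startswith(p, j) in Python is the prefix test on the suffix s[j:] (exact: 0 ≤ j)
def nsLoopB (s : List Char) (i : Nat) : List Char :=
  let j := nsSkip s i
  if PySem.Chars.startswith (s.drop j) ['r', 'e', ':'] ||
      PySem.Chars.startswith (s.drop j) ['f', 'w', ':'] then
    nsLoopB s (j + 3)
  else if PySem.Chars.startswith (s.drop j) ['f', 'w', 'd', ':'] then
    nsLoopB s (j + 4)
  else s.drop j
termination_by s.length - i
decreasing_by
  · have hj := nsSkipGe s i
    have h3 : (3 : Nat) ≤ (s.drop (nsSkip s i)).length := by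
      rename_i h
      rcases Bool.or_eq_true_iff.mp h with h' | h'
      · exact nsSwLen _ _ h'
      · exact nsSwLen _ _ h'
    have hdl : (s.drop (nsSkip s i)).length = s.length - nsSkip s i := List.length_drop
    omega
  · have hj := nsSkipGe s i
    have h4 : (4 : Nat) ≤ (s.drop (nsSkip s i)).length := by
      rename_i h
      exact nsSwLen _ _ h
    have hdl : (s.drop (nsSkip s i)).length = s.length - nsSkip s i := List.length_drop
    omega

def normalize_subject_alt (subject : String) : String :=
  String.ofList (nsLoopB (PySem.Chars.lower (PySem.Chars.strip subject.toList)) 0)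

-- ===== PRECONDITION & SPEC =====
def Spec_normalize_subject (subject : String) (out : String) : Prop := out = normalize_subject_alt subject
instance (subject : String) (out : String) : Decidable (Spec_normalize_subject subject out) := by unfold Spec_normalize_subject; infer_instance

-- ===== CLAIM (what is proved, stated in full; the proofs are below) =====
def Claim_equal_normalize_subject : Prop := ∀ (subject : String), Dom_normalize_subject subject → Spec_normalize_subject subject (normalize_subject subject)

-- ===== LEMMAS AND PROOFS =====

theorem nsCharEqIff (c d : Char) : c = d ↔ c.toNat = d.toNat := by
  constructor
  · rintro rfl; rfl
  · intro h
    rw [← Char.ofNat_toNat c, ← Char.ofNat_toNat d, h]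

theorem nsWsEq (c : Char) (h : pvDomChar c = true) : PySem.Chars.isspace c = nsWs c := by
  simp only [pvDomChar, Bool.or_eq_true, Bool.and_eq_true, decide_eq_true_eq, beq_iff_eq] at h
  have e1 : (' ' : Char).toNat = 32 := by decide
  have e2 : ('\t' : Char).toNat = 9 := by decide
  have e3 : ('\n' : Char).toNat = 10 := by decide
  have e4 : ('\r' : Char).toNat = 13 := by decide
  have e5 : ('\x0B' : Char).toNat = 11 := by decide
  have e6 : ('\x0C' : Char).toNat = 12 := by decide
  simp only [PySem.Chars.isspace, nsWs, List.mem_cons, List.not_mem_nil, or_false, nsCharEqIff]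
  show _ = decide _
  simp only [e1, e2, e3, e4, e5, e6]
  norm_num
  rw [Bool.eq_iff_iff]
  simp only [Bool.or_eq_true, Bool.and_eq_true, decide_eq_true_eq]
  omega

theorem nsToNatOfNat (n : Nat) (h : n < 55296) : (Char.ofNat n).toNat = n := by
  rw [Char.toNat_ofNat, if_pos (Or.inl h)]

theorem nsIsspaceLower (c : Char) :
    PySem.Chars.isspace (PySem.Chars.lowerChar c) = PySem.Chars.isspace c := by
  unfold PySem.Chars.lowerChar
  split
  · rename_i h
    simp only [PySem.Chars.isupper, Bool.and_eq_true, decide_eq_true_eq] at h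
    have ha : 65 ≤ c.toNat := Nat.succ_le_of_lt h.1
    have hb : c.toNat ≤ 90 := Fin.mk_le_mk.mp h.2
    have h2 : (Char.ofNat (c.toNat + 32)).toNat = c.toNat + 32 := nsToNatOfNat _ (by omega)
    simp only [PySem.Chars.isspace, h2]
    rw [Bool.eq_iff_iff]
    simp only [Bool.or_eq_true, Bool.and_eq_true, decide_eq_true_eq]
    omega
  · rfl

theorem nsDomLower (c : Char) (h : pvDomChar c = true) :
    pvDomChar (PySem.Chars.lowerChar c) = true := by
  unfold PySem.Chars.lowerChar
  split
  · rename_i hu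
    simp only [PySem.Chars.isupper, Bool.and_eq_true, decide_eq_true_eq] at hu
    have ha : 65 ≤ c.toNat := Nat.succ_le_of_lt hu.1
    have hb : c.toNat ≤ 90 := Fin.mk_le_mk.mp hu.2
    have h2 : (Char.ofNat (c.toNat + 32)).toNat = c.toNat + 32 := nsToNatOfNat _ (by omega)
    simp only [pvDomChar, h2]
    simp only [Bool.or_eq_true, Bool.and_eq_true, decide_eq_true_eq, beq_iff_eq]
    omega
  · exact h

theorem nsDropWhileCongr (p q : Char → Bool) (l : List Char) (h : ∀ x ∈ l, p x = q x) :
    l.dropWhile p = l.dropWhile q := by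
  induction l with
  | nil => rfl
  | cons a t ih =>
    simp only [List.dropWhile_cons, h a (by simp)]
    split
    · exact ih fun x hx => h x (by simp [hx])
    · rfl

theorem nsDropWhileWs (t : List Char) (hd : ∀ c ∈ t, pvDomChar c = true) :
    t.dropWhile PySem.Chars.isspace = t.dropWhile nsWs :=
  nsDropWhileCongr _ _ _ (fun c hc => nsWsEq c (hd c hc))

theorem nsPrefixDropWhile {p : Char → Bool} {l L : List Char} (hp : l <+: L)
    (hL : L.dropWhile p = L) : l.dropWhile p = l := by
  rw [List.dropWhile_eq_self_iff] at hL ⊢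
  intro hl
  have hL0 : 0 < L.length := lt_of_lt_of_le hl hp.length_le
  rw [List.IsPrefix.getElem hp hl]
  exact hL hL0

theorem nsRstripSuffix {s t : List Char} (hr : PySem.Chars.rstrip s = s) (ht : t <:+ s) :
    PySem.Chars.rstrip t = t := by
  unfold PySem.Chars.rstrip at hr ⊢
  have hrev : s.reverse.dropWhile PySem.Chars.isspace = s.reverse := by
    have := congrArg List.reverse hr
    simpa using this
  have hpre : t.reverse <+: s.reverse := List.reverse_prefix.mpr ht
  rw [nsPrefixDropWhile hpre hrev, List.reverse_reverse]

theorem nsRstripIdem (y : List Char) :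
    PySem.Chars.rstrip (PySem.Chars.rstrip y) = PySem.Chars.rstrip y := by
  unfold PySem.Chars.rstrip
  rw [List.reverse_reverse, List.dropWhile_idempotent]

theorem nsRstripPrefix (y : List Char) : PySem.Chars.rstrip y <+: y := by
  rw [← List.reverse_suffix]
  show (List.dropWhile PySem.Chars.isspace y.reverse).reverse.reverse <:+ y.reverse
  rw [List.reverse_reverse]
  exact List.dropWhile_suffix _

theorem nsLstripStrip (x : List Char) :
    PySem.Chars.lstrip (PySem.Chars.strip x) = PySem.Chars.strip x := by
  unfold PySem.Chars.strip PySem.Chars.lstrip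
  exact nsPrefixDropWhile (nsRstripPrefix _) (List.dropWhile_idempotent _ _)

theorem nsStripSubset (x : List Char) : ∀ c ∈ PySem.Chars.strip x, c ∈ x := by
  intro c hc
  unfold PySem.Chars.strip at hc
  have h1 : c ∈ PySem.Chars.lstrip x := (nsRstripPrefix _).subset hc
  unfold PySem.Chars.lstrip at h1
  exact (List.dropWhile_suffix _).subset h1

theorem nsAdv (s : List Char) (k : Nat) (hd : ∀ c ∈ s, pvDomChar c = true)
    (hr : PySem.Chars.rstrip s = s) :
    PySem.Chars.strip (s.drop k) = (s.drop k).dropWhile PySem.Chars.isspace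
    ∧ (∀ c ∈ (s.drop k).dropWhile PySem.Chars.isspace, pvDomChar c = true)
    ∧ PySem.Chars.rstrip ((s.drop k).dropWhile PySem.Chars.isspace)
        = (s.drop k).dropWhile PySem.Chars.isspace
    ∧ PySem.Chars.lstrip ((s.drop k).dropWhile PySem.Chars.isspace)
        = (s.drop k).dropWhile PySem.Chars.isspace
    ∧ ((s.drop k).dropWhile PySem.Chars.isspace).length ≤ s.length - k
    ∧ (s.drop k).dropWhile PySem.Chars.isspace = (s.drop k).dropWhile nsWs := by
  have hsuf : (s.drop k).dropWhile PySem.Chars.isspace <:+ s :=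
    (List.dropWhile_suffix _).trans (List.drop_suffix k s)
  have hrt : PySem.Chars.rstrip ((s.drop k).dropWhile PySem.Chars.isspace)
      = (s.drop k).dropWhile PySem.Chars.isspace := nsRstripSuffix hr hsuf
  refine ⟨?_, ?_, hrt, ?_, ?_, ?_⟩
  · unfold PySem.Chars.strip PySem.Chars.lstrip
    exact hrt
  · intro c hc; exact hd c (hsuf.subset hc)
  · exact List.dropWhile_idempotent _ _
  · have h1 := List.length_dropWhile_le PySem.Chars.isspace (s.drop k)
    have h2 : (s.drop k).length = s.length - k := List.length_drop
    omega
  · exact nsDropWhileWs _ (fun c hc => hd c ((List.drop_suffix k s).subset hc))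

-- the common normal-form recursion both loops compute (proof-only helper)
def nsPeel (t : List Char) : List Char :=
  if PySem.Chars.startswith (t.dropWhile nsWs) ['r', 'e', ':'] ||
      PySem.Chars.startswith (t.dropWhile nsWs) ['f', 'w', ':'] then
    nsPeel ((t.dropWhile nsWs).drop 3)
  else if PySem.Chars.startswith (t.dropWhile nsWs) ['f', 'w', 'd', ':'] then
    nsPeel ((t.dropWhile nsWs).drop 4)
  else t.dropWhile nsWs
termination_by t.length
decreasing_by
  · have h3 : (3 : Nat) ≤ (t.dropWhile nsWs).length := by
      rename_i h
      rcases Bool.or_eq_true_iff.mp h with h' | h'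
      · exact nsSwLen _ _ h'
      · exact nsSwLen _ _ h'
    have h1 := List.length_dropWhile_le nsWs t
    have h2 : ((t.dropWhile nsWs).drop 3).length = (t.dropWhile nsWs).length - 3 := List.length_drop
    omega
  · have h4 : (4 : Nat) ≤ (t.dropWhile nsWs).length := by
      rename_i h
      exact nsSwLen _ _ h
    have h1 := List.length_dropWhile_le nsWs t
    have h2 : ((t.dropWhile nsWs).drop 4).length = (t.dropWhile nsWs).length - 4 := List.length_drop
    omega

theorem nsPeelDropWhile (t : List Char) : nsPeel (t.dropWhile nsWs) = nsPeel t := by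
  conv_lhs => rw [nsPeel]
  conv_rhs => rw [nsPeel]
  rw [List.dropWhile_idempotent]

theorem nsSkipDrop (s : List Char) (i : Nat) :
    s.drop (nsSkip s i) = (s.drop i).dropWhile nsWs := by
  induction i using nsSkip.induct s with
  | case1 i h hw ih =>
    rw [nsSkip, dif_pos h, if_pos hw, ih, List.drop_eq_getElem_cons h, List.dropWhile_cons,
      if_pos hw]
  | case2 i h hw =>
    rw [nsSkip, dif_pos h, if_neg hw, List.drop_eq_getElem_cons h, List.dropWhile_cons,
      if_neg hw, ← List.drop_eq_getElem_cons h]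
  | case3 i h =>
    rw [nsSkip, dif_neg h, List.drop_eq_nil_of_le (by omega), List.dropWhile_nil]

theorem nsLoopBPeel (s : List Char) (i : Nat) : nsLoopB s i = nsPeel (s.drop i) := by
  induction i using nsLoopB.induct s with
  | case1 i j h ih =>
    rw [nsLoopB, ih]
    conv_rhs => rw [nsPeel]
    rw [nsSkipDrop] at h
    rw [nsSkipDrop s i]
    simp only [h, if_true]
    rw [← nsSkipDrop s i, List.drop_drop]
  | case2 i j h h2 ih =>
    rw [nsLoopB, ih]
    conv_rhs => rw [nsPeel]
    rw [nsSkipDrop] at h h2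
    rw [nsSkipDrop s i]
    simp only [h, h2, if_true, Bool.false_eq_true, if_false]
    rw [← nsSkipDrop s i, List.drop_drop]
  | case3 i j h h2 =>
    rw [nsLoopB]
    conv_rhs => rw [nsPeel]
    rw [nsSkipDrop] at h h2
    rw [nsSkipDrop s i]
    simp only [h, h2, Bool.false_eq_true, if_false]

theorem nsDjRe (s : List Char) (h : PySem.Chars.startswith s ['r', 'e', ':'] = true) :
    PySem.Chars.startswith s ['f', 'w', ':'] = false
    ∧ PySem.Chars.startswith s ['f', 'w', 'd', ':'] = false := by
  obtain ⟨t, rfl⟩ := (PySem.Chars.startswith_iff _ _).mp h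
  constructor <;> rfl

theorem nsDjFwd (s : List Char) (h : PySem.Chars.startswith s ['f', 'w', 'd', ':'] = true) :
    PySem.Chars.startswith s ['f', 'w', ':'] = false
    ∧ PySem.Chars.startswith s ['r', 'e', ':'] = false := by
  obtain ⟨t, rfl⟩ := (PySem.Chars.startswith_iff _ _).mp h
  constructor <;> rfl

theorem nsLoopAPeel : ∀ (n : Nat) (s : List Char), s.length ≤ n →
    (∀ c ∈ s, pvDomChar c = true) → PySem.Chars.rstrip s = s → PySem.Chars.lstrip s = s →
    nsLoopA s = nsPeel s := by
  intro n
  induction n with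
  | zero =>
    intro s hlen _ _ _
    have hs : s = [] := List.eq_nil_of_length_eq_zero (Nat.le_zero.mp hlen)
    subst hs
    rw [nsLoopA, nsPeel]
    norm_num [nsPass, nsStep, PySem.Chars.startswith, List.isPrefixOf]
  | succ n ih =>
    intro s hlen hd hr hl
    have hws : s.dropWhile nsWs = s := by
      rw [← nsDropWhileWs s hd]; exact hl
    by_cases hre : PySem.Chars.startswith s ['r', 'e', ':'] = true
    · obtain ⟨he, hd1, hr1, hl1, hlen1, hws1⟩ := nsAdv s 3 hd hr
      have hslen : 3 ≤ s.length := by simpa using nsSwLen s _ hre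
      set t := (s.drop 3).dropWhile PySem.Chars.isspace with htdef
      have hlt : t.length ≤ n := by omega
      have hl1' : t.dropWhile nsWs = t := by rw [← nsDropWhileWs t hd1]; exact hl1
      have hpeelt : nsPeel t = nsPeel s := by
        rw [hws1, nsPeelDropWhile]
        conv_rhs => rw [nsPeel]
        simp [hws, hre]
      have st1 : nsStep (s, false) ['r', 'e', ':'] = (t, true) := by
        simp [nsStep, hre, he]
      by_cases h1re : PySem.Chars.startswith t ['r', 'e', ':'] = true
      · obtain ⟨hfw1, hfwd1⟩ := nsDjRe t h1re
        have hp : nsPass s = (t, true) := by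
          rw [nsPass, st1]
          simp [nsStep, hfw1, hfwd1]
        rw [nsLoopA, hp, dif_pos rfl]
        exact (ih t hlt hd1 hr1 hl1).trans hpeelt
      · rw [Bool.not_eq_true] at h1re
        by_cases h1fw : PySem.Chars.startswith t ['f', 'w', ':'] = true
        · obtain ⟨he2, hd2, hr2, hl2, hlen2, hws2⟩ := nsAdv t 3 hd1 hr1
          have ht3 : 3 ≤ t.length := by simpa using nsSwLen t _ h1fw
          set u := (t.drop 3).dropWhile PySem.Chars.isspace with hudef
          have hlu : u.length ≤ n := by omega
          have hl2' : u.dropWhile nsWs = u := by rw [← nsDropWhileWs u hd2]; exact hl2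
          have hpeelu : nsPeel u = nsPeel t := by
            rw [hws2, nsPeelDropWhile]
            conv_rhs => rw [nsPeel]
            simp [hl1', h1fw]
          have st2 : nsStep (t, true) ['f', 'w', ':'] = (u, true) := by
            simp [nsStep, h1fw, he2]
          by_cases h2fwd : PySem.Chars.startswith u ['f', 'w', 'd', ':'] = true
          · obtain ⟨he3, hd3, hr3, hl3, hlen3, hws3⟩ := nsAdv u 4 hd2 hr2
            have hu4 : 4 ≤ u.length := by simpa using nsSwLen u _ h2fwd
            set v := (u.drop 4).dropWhile PySem.Chars.isspace with hvdef
            have hlv : v.length ≤ n := by omega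
            obtain ⟨hufw, hure⟩ := nsDjFwd u h2fwd
            have hpeelv : nsPeel v = nsPeel u := by
              rw [hws3, nsPeelDropWhile]
              conv_rhs => rw [nsPeel]
              simp [hl2', hure, hufw, h2fwd]
            have st3 : nsStep (u, true) ['f', 'w', 'd', ':'] = (v, true) := by
              simp [nsStep, h2fwd, he3]
            have hp : nsPass s = (v, true) := by rw [nsPass, st1, st2, st3]
            rw [nsLoopA, hp, dif_pos rfl]
            exact (((ih v hlv hd3 hr3 hl3).trans hpeelv).trans hpeelu).trans hpeelt
          · rw [Bool.not_eq_true] at h2fwd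
            have st3 : nsStep (u, true) ['f', 'w', 'd', ':'] = (u, true) := by
              simp [nsStep, h2fwd]
            have hp : nsPass s = (u, true) := by rw [nsPass, st1, st2, st3]
            rw [nsLoopA, hp, dif_pos rfl]
            exact ((ih u hlu hd2 hr2 hl2).trans hpeelu).trans hpeelt
        · rw [Bool.not_eq_true] at h1fw
          by_cases h1fwd : PySem.Chars.startswith t ['f', 'w', 'd', ':'] = true
          · obtain ⟨he2, hd2, hr2, hl2, hlen2, hws2⟩ := nsAdv t 4 hd1 hr1
            have ht4 : 4 ≤ t.length := by simpa using nsSwLen t _ h1fwd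
            set u := (t.drop 4).dropWhile PySem.Chars.isspace with hudef
            have hlu : u.length ≤ n := by omega
            have hpeelu : nsPeel u = nsPeel t := by
              rw [hws2, nsPeelDropWhile]
              conv_rhs => rw [nsPeel]
              simp [hl1', h1re, h1fw, h1fwd]
            have st2 : nsStep (t, true) ['f', 'w', ':'] = (t, true) := by
              simp [nsStep, h1fw]
            have st3 : nsStep (t, true) ['f', 'w', 'd', ':'] = (u, true) := by
              simp [nsStep, h1fwd, he2]
            have hp : nsPass s = (u, true) := by rw [nsPass, st1, st2, st3]
            rw [nsLoopA, hp, dif_pos rfl]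
            exact ((ih u hlu hd2 hr2 hl2).trans hpeelu).trans hpeelt
          · rw [Bool.not_eq_true] at h1fwd
            have st2 : nsStep (t, true) ['f', 'w', ':'] = (t, true) := by
              simp [nsStep, h1fw]
            have st3 : nsStep (t, true) ['f', 'w', 'd', ':'] = (t, true) := by
              simp [nsStep, h1fwd]
            have hp : nsPass s = (t, true) := by rw [nsPass, st1, st2, st3]
            rw [nsLoopA, hp, dif_pos rfl]
            exact (ih t hlt hd1 hr1 hl1).trans hpeelt
    · rw [Bool.not_eq_true] at hre
      have st1 : nsStep (s, false) ['r', 'e', ':'] = (s, false) := by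
        simp [nsStep, hre]
      by_cases hfw : PySem.Chars.startswith s ['f', 'w', ':'] = true
      · obtain ⟨he, hd1, hr1, hl1, hlen1, hws1⟩ := nsAdv s 3 hd hr
        have hslen : 3 ≤ s.length := by simpa using nsSwLen s _ hfw
        set t := (s.drop 3).dropWhile PySem.Chars.isspace with htdef
        have hlt : t.length ≤ n := by omega
        have hl1' : t.dropWhile nsWs = t := by rw [← nsDropWhileWs t hd1]; exact hl1
        have hpeelt : nsPeel t = nsPeel s := by
          rw [hws1, nsPeelDropWhile]
          conv_rhs => rw [nsPeel]
          simp [hws, hfw]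
        have st2 : nsStep (s, false) ['f', 'w', ':'] = (t, true) := by
          simp [nsStep, hfw, he]
        by_cases h1fwd : PySem.Chars.startswith t ['f', 'w', 'd', ':'] = true
        · obtain ⟨he2, hd2, hr2, hl2, hlen2, hws2⟩ := nsAdv t 4 hd1 hr1
          have ht4 : 4 ≤ t.length := by simpa using nsSwLen t _ h1fwd
          set u := (t.drop 4).dropWhile PySem.Chars.isspace with hudef
          have hlu : u.length ≤ n := by omega
          obtain ⟨htfw, htre⟩ := nsDjFwd t h1fwd
          have hpeelu : nsPeel u = nsPeel t := by
            rw [hws2, nsPeelDropWhile]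
            conv_rhs => rw [nsPeel]
            simp [hl1', htre, htfw, h1fwd]
          have st3 : nsStep (t, true) ['f', 'w', 'd', ':'] = (u, true) := by
            simp [nsStep, h1fwd, he2]
          have hp : nsPass s = (u, true) := by rw [nsPass, st1, st2, st3]
          rw [nsLoopA, hp, dif_pos rfl]
          exact ((ih u hlu hd2 hr2 hl2).trans hpeelu).trans hpeelt
        · rw [Bool.not_eq_true] at h1fwd
          have st3 : nsStep (t, true) ['f', 'w', 'd', ':'] = (t, true) := by
            simp [nsStep, h1fwd]
          have hp : nsPass s = (t, true) := by rw [nsPass, st1, st2, st3]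
          rw [nsLoopA, hp, dif_pos rfl]
          exact (ih t hlt hd1 hr1 hl1).trans hpeelt
      · rw [Bool.not_eq_true] at hfw
        have st2 : nsStep (s, false) ['f', 'w', ':'] = (s, false) := by
          simp [nsStep, hfw]
        by_cases hfwd : PySem.Chars.startswith s ['f', 'w', 'd', ':'] = true
        · obtain ⟨he, hd1, hr1, hl1, hlen1, hws1⟩ := nsAdv s 4 hd hr
          have hslen : 4 ≤ s.length := by simpa using nsSwLen s _ hfwd
          set t := (s.drop 4).dropWhile PySem.Chars.isspace with htdef
          have hlt : t.length ≤ n := by omega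
          have hpeelt : nsPeel t = nsPeel s := by
            rw [hws1, nsPeelDropWhile]
            conv_rhs => rw [nsPeel]
            simp [hws, hre, hfw, hfwd]
          have st3 : nsStep (s, false) ['f', 'w', 'd', ':'] = (t, true) := by
            simp [nsStep, hfwd, he]
          have hp : nsPass s = (t, true) := by rw [nsPass, st1, st2, st3]
          rw [nsLoopA, hp, dif_pos rfl]
          exact (ih t hlt hd1 hr1 hl1).trans hpeelt
        · rw [Bool.not_eq_true] at hfwd
          have st3 : nsStep (s, false) ['f', 'w', 'd', ':'] = (s, false) := by
            simp [nsStep, hfwd]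
          have hp : nsPass s = (s, false) := by rw [nsPass, st1, st2, st3]
          rw [nsLoopA, hp, dif_neg (by simp)]
          conv_rhs => rw [nsPeel]
          simp [hws, hre, hfw, hfwd]

theorem nsLstripLower (y : List Char) :
    PySem.Chars.lstrip (PySem.Chars.lower y) = PySem.Chars.lower (PySem.Chars.lstrip y) := by
  simp only [PySem.Chars.lstrip, PySem.Chars.lower]
  rw [List.dropWhile_map]
  congr 1
  exact nsDropWhileCongr _ _ _ (fun x _ => nsIsspaceLower x)

theorem nsRstripLower (y : List Char) :
    PySem.Chars.rstrip (PySem.Chars.lower y) = PySem.Chars.lower (PySem.Chars.rstrip y) := by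
  simp only [PySem.Chars.rstrip, PySem.Chars.lower]
  rw [← List.map_reverse, List.dropWhile_map,
    nsDropWhileCongr (PySem.Chars.isspace ∘ PySem.Chars.lowerChar) PySem.Chars.isspace y.reverse
      (fun x _ => nsIsspaceLower x), List.map_reverse]

theorem normalize_subject_spec : Claim_equal_normalize_subject := by
  intro subject hdom
  unfold Spec_normalize_subject normalize_subject normalize_subject_alt
  congr 1
  have hdx : ∀ c ∈ subject.toList, pvDomChar c = true := by
    have h : pvDomStr subject = true := hdom
    simpa [pvDomStr, List.all_eq_true] using h
  have hdstrip : ∀ c ∈ PySem.Chars.strip subject.toList, pvDomChar c = true :=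
    fun c hc => hdx c (nsStripSubset _ c hc)
  have hd0 : ∀ c ∈ PySem.Chars.lower (PySem.Chars.strip subject.toList), pvDomChar c = true := by
    intro c hc
    obtain ⟨c', hc', rfl⟩ := List.mem_map.mp hc
    exact nsDomLower c' (hdstrip c' hc')
  have hrs : PySem.Chars.rstrip (PySem.Chars.strip subject.toList)
      = PySem.Chars.strip subject.toList := nsRstripIdem _
  have hls : PySem.Chars.lstrip (PySem.Chars.strip subject.toList)
      = PySem.Chars.strip subject.toList := nsLstripStrip _
  have hr0 : PySem.Chars.rstrip (PySem.Chars.lower (PySem.Chars.strip subject.toList))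
      = PySem.Chars.lower (PySem.Chars.strip subject.toList) := by
    rw [nsRstripLower, hrs]
  have hl0 : PySem.Chars.lstrip (PySem.Chars.lower (PySem.Chars.strip subject.toList))
      = PySem.Chars.lower (PySem.Chars.strip subject.toList) := by
    rw [nsLstripLower, hls]
  rw [nsLoopAPeel _ _ le_rfl hd0 hr0 hl0, nsLoopBPeel _ 0, List.drop_zero]
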